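-- pv_equiv track=rewrite | github.com/NingchuanIC/data_experiment | data/build_graph_sector/build_sector_relation_matrix.py | build_relation_matrix
-- ===== SOURCE A (Python) =====
-- from typing import List, Tuple
--
-- def build_relation_matrix(data: List[Tuple[str, str]]) -> Tuple[List[str], List[List[int]]]:
--     """Build adjacency matrix: 1 if same sector else 0."""
--     ts_codes = [item[0] for item in data]
--     sectors = [item[1] for item in data]
--     n = len(ts_codes)
--
--     matrix: List[List[int]] = []
--     for i in range(n):
--         row: List[int] = []
--         for j in range(n):
--             row.append(1 if sectors[i] == sectors[j] else 0)
--         matrix.append(row)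
--
--     return ts_codes, matrix
-- ===== SOURCE B (Python) =====
-- def build_relation_matrix(data):
--     """Build adjacency matrix: 1 if same sector else 0."""
--     ts_codes = [code for code, _ in data]
--     sectors = [sector for _, sector in data]
--
--     # memoize one row per distinct sector: all rows of a sector are identical
--     row_of = {}
--     for s in sectors:
--         if s not in row_of:
--             row_of[s] = [1 if s == t else 0 for t in sectors]
--
--     matrix = [row_of[s] for s in sectors]
--     return ts_codes, matrix
-- ===== Notes on version B (the rewrite author's own statement) =====
-- stated objective: faster
-- what changed: Instead of comparing sectors[i]==sectors[j] for every cell, B builds one row per DISTINCT sector in a memo dict and assembles the matrix by looking each row up, so only k*n string comparisons are done for k distinct sectors instead of n^2.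
import Mathlib
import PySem

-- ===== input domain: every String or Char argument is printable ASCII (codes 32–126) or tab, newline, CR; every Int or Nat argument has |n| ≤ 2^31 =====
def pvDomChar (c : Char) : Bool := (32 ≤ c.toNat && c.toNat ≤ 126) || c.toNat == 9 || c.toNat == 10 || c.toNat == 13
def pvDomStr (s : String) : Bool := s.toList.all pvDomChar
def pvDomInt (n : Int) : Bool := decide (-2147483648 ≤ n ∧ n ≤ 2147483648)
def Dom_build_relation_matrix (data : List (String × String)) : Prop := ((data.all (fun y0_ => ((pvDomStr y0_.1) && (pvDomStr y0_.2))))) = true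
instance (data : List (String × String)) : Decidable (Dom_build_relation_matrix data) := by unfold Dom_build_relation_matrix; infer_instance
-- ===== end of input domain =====

-- B replaces A's per-cell sector comparison by a memo dict holding one row per distinct sector (objective: faster, k·n instead of n² string comparisons).

-- ===== PORT A =====
-- nested index loops; sectors[i] is in range for i in range(n), so pyGetD with dummy default is exact
def build_relation_matrix (data : List (String × String)) : List String × List (List Int) :=
  let ts_codes := data.map (fun item => item.1)
  let sectors := data.map (fun item => item.2)
  let n : Int := (ts_codes.length : Int)
  let matrix := (PySem.List.pyRange 0 n 1).foldl (fun m i =>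
    m ++ [(PySem.List.pyRange 0 n 1).foldl (fun row j =>
      row ++ [if PySem.List.pyGetD sectors i "" == PySem.List.pyGetD sectors j "" then (1 : Int) else 0]) []]) []
  (ts_codes, matrix)

-- ===== PORT B =====
-- 'row_of[s]' in Source B: the key is always present (it was inserted when s was first seen), so getD with [] is exact
def build_relation_matrix_alt (data : List (String × String)) : List String × List (List Int) :=
  let ts_codes := data.map (fun p => p.1)
  let sectors := data.map (fun p => p.2)
  let row_of := sectors.foldl (fun d s =>
      if d.contains s then d
      else d.insert s (sectors.map (fun t => if s == t then (1 : Int) else 0)))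
    PySem.Dict.empty
  let matrix := sectors.map (fun s => row_of.getD s [])
  (ts_codes, matrix)

-- ===== PRECONDITION & SPEC =====
def Spec_build_relation_matrix (data : List (String × String)) (out : List String × List (List Int)) : Prop := out = build_relation_matrix_alt data
instance (data : List (String × String)) (out : List String × List (List Int)) : Decidable (Spec_build_relation_matrix data out) := by unfold Spec_build_relation_matrix; infer_instance

-- ===== CLAIM (what is proved, stated in full; the proofs are below) =====
def Claim_equal_build_relation_matrix : Prop := ∀ (data : List (String × String)), Dom_build_relation_matrix data → Spec_build_relation_matrix data (build_relation_matrix data)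

-- ===== LEMMAS AND PROOFS =====

-- mapping a function over 'range(len(xs))'-indexed reads is mapping it over xs
theorem pv_map_index {β : Type} (xs : List String) (f : String → β) :
    (PySem.List.pyRange 0 (xs.length : Int) 1).map (fun i => f (PySem.List.pyGetD xs i "")) = xs.map f := by
  have h := PySem.List.map_pyGetD_pyRange_zero' xs ""
  calc (PySem.List.pyRange 0 (xs.length : Int) 1).map (fun i => f (PySem.List.pyGetD xs i ""))
      = ((PySem.List.pyRange 0 (xs.length : Int) 1).map (fun i => PySem.List.pyGetD xs i "")).map f := by
        rw [List.map_map]; rfl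
    _ = xs.map f := by rw [h]

-- memo-dict invariant: once every stored key maps to its row, every looked-up key does
theorem pv_memo (f : String → List Int) :
    ∀ (l : List String) (d : PySem.Dict String (List Int)),
      (∀ k, d.contains k = true → d.getD k [] = f k) →
      ∀ s, (s ∈ l ∨ d.contains s = true) →
        (l.foldl (fun d s => if d.contains s then d else d.insert s (f s)) d).getD s [] = f s := by
  intro l
  induction l with
  | nil =>
    intro d hd s hs
    simp only [List.foldl_nil]
    exact hd s (hs.resolve_left (by simp))
  | cons a t ih =>
    intro d hd s hs
    simp only [List.foldl_cons]
    by_cases hc : d.contains a = true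
    · simp only [hc, if_true]
      refine ih d hd s ?_
      rcases hs with hm | h
      · rcases List.mem_cons.mp hm with rfl | hm
        · exact Or.inr hc
        · exact Or.inl hm
      · exact Or.inr h
    · simp only [hc]
      refine ih (d.insert a (f a)) ?_ s ?_
      · intro k hk
        by_cases hek : k = a
        · subst hek; rw [PySem.Dict.getD_insert_self]
        · rw [PySem.Dict.getD_insert, if_neg hek]
          refine hd k ?_
          have := PySem.Dict.contains_insert (d := d) (k := a) (v := f a) (k' := k)
          rw [this] at hk
          simpa [hek] using hk
      · rcases hs with hm | h
        · rcases List.mem_cons.mp hm with rfl | hm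
          · exact Or.inr (PySem.Dict.contains_insert_self _ _ _)
          · exact Or.inl hm
        · exact Or.inr (by
            have := PySem.Dict.contains_insert (d := d) (k := a) (v := f a) (k' := s)
            rw [this, h]; simp)

-- ===== VERDICT (by name: the statement is the Claim_ definition above) =====
theorem build_relation_matrix_spec : Claim_equal_build_relation_matrix := by
  intro data _
  unfold Spec_build_relation_matrix build_relation_matrix build_relation_matrix_alt
  simp only []
  refine Prod.ext rfl ?_
  set sectors := data.map (fun p => p.2) with hsec
  have hlen : ((data.map (fun item => item.1)).length : Int) = (sectors.length : Int) := by
    simp [hsec]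
  rw [hlen]
  rw [PySem.List.foldl_append_singleton_eq_map]
  simp only [List.nil_append]
  have hinner : ∀ i : Int,
      (PySem.List.pyRange 0 (sectors.length : Int) 1).foldl (fun row j =>
        row ++ [if PySem.List.pyGetD sectors i "" == PySem.List.pyGetD sectors j "" then (1 : Int) else 0]) []
      = sectors.map (fun t => if PySem.List.pyGetD sectors i "" == t then (1 : Int) else 0) := by
    intro i
    rw [PySem.List.foldl_append_singleton_eq_map]
    simp only [List.nil_append]
    exact pv_map_index sectors (fun t => if PySem.List.pyGetD sectors i "" == t then (1 : Int) else 0)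
  simp only [hinner]
  rw [pv_map_index sectors (fun s => sectors.map (fun t => if s == t then (1 : Int) else 0))]
  apply List.map_congr_left
  intro s hs
  exact (pv_memo (fun s => sectors.map (fun t => if s == t then (1 : Int) else 0)) sectors
    PySem.Dict.empty (by intro k hk; simp at hk) s (Or.inl hs)).symm
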